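-- pv_equiv track=rewrite | github.com/drew-mcl/scripts | migration_check.py | generate_summary_table_for_file
-- ===== SOURCE A (Python) =====
-- def generate_summary_table_for_file(all_project_results):
--     """Generates a summary table string for the file report."""
--     if not all_project_results:
--         return "No projects matching criteria to summarize."
--
--     headers = ["Project", "Overall Status", "Artifacts (Core)", "Classes", "Tests"] # Clarified Artifacts column
--
--     table_data_rows = []
--     for res in all_project_results:
--         row_data = {
--             "Project": res.get("project_path", "N/A"),
--             "Overall Status": res.get("overall_status", "N/A"),
--             "Artifacts (Core)": res.get("artifact_comparison_status", "N/A"), # This status now reflects core content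
--             "Classes": res.get("classes_comparison_status", "N/A"),
--             "Tests": res.get("test_reports_status", "N/A")
--         }
--         table_data_rows.append(row_data)
--
--     col_widths = {header: len(header) for header in headers}
--     for row_dict in table_data_rows:
--         for header_name in headers:
--             col_widths[header_name] = max(col_widths[header_name], len(str(row_dict.get(header_name, ""))))
--
--     padding = 2
--     for header_name in col_widths: col_widths[header_name] += padding
--
--     header_row_str = " | ".join([f"{h:<{col_widths[h]}}" for h in headers])
--     separator_row_str = "-+-".join(["-" * col_widths[h] for h in headers])
--
--     data_rows_str_list = []
--     for row_dict in table_data_rows: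
--         cells = [f"{str(row_dict.get(h, '')):<{col_widths[h]}}" for h in headers]
--         data_rows_str_list.append(" | ".join(cells))
--
--     return header_row_str + "\n" + separator_row_str + "\n" + "\n".join(data_rows_str_list)
-- ===== SOURCE B (Python) =====
-- def _column_block(header, key, results):
--     """One fully padded column: padded header, dash rule, padded cells."""
--     cells = [res.get(key, "N/A") for res in results]
--     width = max(len(s) for s in [header] + cells) + 2
--     return [header.ljust(width), "-" * width] + [c.ljust(width) for c in cells]
--
-- def generate_summary_table_for_file(all_project_results):
--     """Generates a summary table string for the file report."""
--     if not all_project_results: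
--         return "No projects matching criteria to summarize."
--     spec = [("Project", "project_path"),
--             ("Overall Status", "overall_status"),
--             ("Artifacts (Core)", "artifact_comparison_status"),
--             ("Classes", "classes_comparison_status"),
--             ("Tests", "test_reports_status")]
--     # build the table column by column: start with the first column's block and
--     # stitch each further padded column onto every line (row 1 is the rule row).
--     lines = _column_block(spec[0][0], spec[0][1], all_project_results)
--     for header, key in spec[1:]:
--         block = _column_block(header, key, all_project_results)
--         lines = [line + ("-+-" if i == 1 else " | ") + cell
--                  for i, (line, cell) in enumerate(zip(lines, block))]
--     return "\n".join(lines)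
-- ===== Notes on version B (the rewrite author's own statement) =====
-- stated objective: alternative
-- what changed: B builds the table column by column: each column becomes a fully padded block (padded header, dash rule, padded cells, width computed locally per column), and the blocks are stitched together horizontally by concatenating line-by-line with ' | ' (or '-+-' on the rule row); A works row-major with per-row dicts, a global width dictionary updated by nested loops, and separate header/separator/row formatting passes.
import Mathlib
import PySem

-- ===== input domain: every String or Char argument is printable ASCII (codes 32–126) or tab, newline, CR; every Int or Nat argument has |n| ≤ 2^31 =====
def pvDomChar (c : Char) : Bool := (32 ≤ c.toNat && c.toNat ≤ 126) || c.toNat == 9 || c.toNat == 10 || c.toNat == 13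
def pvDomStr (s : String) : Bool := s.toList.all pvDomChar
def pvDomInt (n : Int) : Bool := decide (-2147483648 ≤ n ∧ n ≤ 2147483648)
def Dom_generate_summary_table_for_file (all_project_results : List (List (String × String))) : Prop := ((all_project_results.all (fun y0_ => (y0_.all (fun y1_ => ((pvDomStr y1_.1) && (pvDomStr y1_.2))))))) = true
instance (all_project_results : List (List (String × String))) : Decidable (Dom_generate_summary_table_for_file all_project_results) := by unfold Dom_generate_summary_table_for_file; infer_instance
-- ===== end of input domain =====

-- B assembles the table column by column (each column a fully padded block, stitched
-- together line-by-line) instead of A's row-major dicts with a global width dictionary;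
-- alternative decomposition, same cost.

-- ===== PORT A =====
def pvA_headers : List String := ["Project", "Overall Status", "Artifacts (Core)", "Classes", "Tests"]

-- the row dict built from res (res.get(k, "N/A") = first-match lookup)
def pvA_row (res : List (String × String)) : PySem.Dict String String :=
  PySem.Dict.mk
    [("Project", (PySem.Dict.mk res).getD "project_path" "N/A"),
     ("Overall Status", (PySem.Dict.mk res).getD "overall_status" "N/A"),
     ("Artifacts (Core)", (PySem.Dict.mk res).getD "artifact_comparison_status" "N/A"),
     ("Classes", (PySem.Dict.mk res).getD "classes_comparison_status" "N/A"),
     ("Tests", (PySem.Dict.mk res).getD "test_reports_status" "N/A")]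

-- f"{s:<{w}}": left-justify s to width w, pad with spaces, never truncate (hand port, exact)
def pvA_ljust (s : String) (w : Int) : String :=
  String.mk (s.toList ++ List.replicate (w - PySem.Str.len s).toNat ' ')

def generate_summary_table_for_file (all_project_results : List (List (String × String))) : String :=
  if all_project_results.isEmpty then "No projects matching criteria to summarize." else
  let headers := pvA_headers
  let table_data_rows := all_project_results.foldl (fun acc res => acc ++ [pvA_row res]) []
  -- col_widths = {header: len(header) for header in headers}
  let col_widths : PySem.Dict String Int := PySem.Dict.mk (headers.map (fun h => (h, PySem.Str.len h)))
  -- col_widths[h] read ported as getD h 0: the key is always present (keys are exactly headers)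
  let col_widths := table_data_rows.foldl (fun d row =>
      headers.foldl (fun d h =>
        d.insert h (max (d.getD h 0) (PySem.Str.len (row.getD h "")))) d) col_widths
  -- for header_name in col_widths: col_widths[header_name] += padding
  let col_widths := col_widths.keys.foldl (fun d h => d.modify h 0 (· + 2)) col_widths
  let header_row_str := PySem.Str.join " | " (headers.map (fun h => pvA_ljust h (col_widths.getD h 0)))
  -- "-" * w ported as replicate w.toNat '-' (exact: Python's "-"*w is empty for w ≤ 0)
  let separator_row_str := PySem.Str.join "-+-"
      (headers.map (fun h => String.mk (List.replicate (col_widths.getD h 0).toNat '-')))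
  let data_rows_str_list := table_data_rows.foldl (fun acc row =>
      acc ++ [PySem.Str.join " | " (headers.map (fun h => pvA_ljust (row.getD h "") (col_widths.getD h 0)))]) []
  header_row_str ++ "\n" ++ separator_row_str ++ "\n" ++ PySem.Str.join "\n" data_rows_str_list

-- ===== PORT B =====
def pvB_spec : List (String × String) :=
  [("Project", "project_path"), ("Overall Status", "overall_status"),
   ("Artifacts (Core)", "artifact_comparison_status"),
   ("Classes", "classes_comparison_status"), ("Tests", "test_reports_status")]

-- s.ljust(w) (hand port, exact: pad on the right with spaces, never truncate)
def pvB_ljust (s : String) (w : Int) : String :=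
  String.mk (s.toList ++ List.replicate (w - PySem.Str.len s).toNat ' ')

-- _column_block(header, key, results)
def pvB_block (header key : String) (results : List (List (String × String))) : List String :=
  let cells := results.map (fun res => (PySem.Dict.mk res).getD key "N/A")
  -- max(len(s) for s in [header] + cells): the list is nonempty, so the getD 0 default is never used
  let width := ((PySem.List.max? ((header :: cells).map PySem.Str.len) (fun x => x)).getD 0) + 2
  pvB_ljust header width :: String.mk (List.replicate width.toNat '-')
    :: cells.map (fun c => pvB_ljust c width)

def generate_summary_table_for_file_alt (all_project_results : List (List (String × String))) : String :=
  if all_project_results.isEmpty then "No projects matching criteria to summarize." else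
  let spec := pvB_spec
  let first := spec.getD 0 ("", "")
  let lines := pvB_block first.1 first.2 all_project_results
  -- spec[1:] is drop 1; the comprehension over enumerate(zip(lines, block)) is mapped literally
  let lines := (spec.drop 1).foldl (fun lines hk =>
      let block := pvB_block hk.1 hk.2 all_project_results
      (PySem.List.enumerate (lines.zip block)).map
        (fun p => p.2.1 ++ (if p.1 == 1 then "-+-" else " | ") ++ p.2.2)) lines
  PySem.Str.join "\n" lines

-- ===== PRECONDITION & SPEC =====
def Spec_generate_summary_table_for_file (all_project_results : List (List (String × String))) (out : String) : Prop := out = generate_summary_table_for_file_alt all_project_results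
instance (all_project_results : List (List (String × String))) (out : String) : Decidable (Spec_generate_summary_table_for_file all_project_results out) := by unfold Spec_generate_summary_table_for_file; infer_instance

-- ===== CLAIM (what is proved, stated in full; the proofs are below) =====
def Claim_equal_generate_summary_table_for_file : Prop := ∀ (all_project_results : List (List (String × String))), Dom_generate_summary_table_for_file all_project_results → Spec_generate_summary_table_for_file all_project_results (generate_summary_table_for_file all_project_results)


-- ===== LEMMAS AND PROOFS =====

-- canonical shape of A's width dictionary
def pvMkD (w1 w2 w3 w4 w5 : Int) : PySem.Dict String Int :=
  PySem.Dict.mk [("Project", w1), ("Overall Status", w2), ("Artifacts (Core)", w3),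
                 ("Classes", w4), ("Tests", w5)]

-- cell lookup shared by the statements of the proof lemmas
def pvc (k : String) (res : List (String × String)) : String :=
  (PySem.Dict.mk res).getD k "N/A"

theorem pv_g1 (res : List (String × String)) :
    (pvA_row res).getD "Project" "" = pvc "project_path" res := by
  simp [pvA_row, pvc, PySem.Dict.getD_eq_get?_getD, PySem.Dict.get?_mk_cons]
theorem pv_g2 (res : List (String × String)) :
    (pvA_row res).getD "Overall Status" "" = pvc "overall_status" res := by
  simp [pvA_row, pvc, PySem.Dict.getD_eq_get?_getD, PySem.Dict.get?_mk_cons]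
theorem pv_g3 (res : List (String × String)) :
    (pvA_row res).getD "Artifacts (Core)" "" = pvc "artifact_comparison_status" res := by
  simp [pvA_row, pvc, PySem.Dict.getD_eq_get?_getD, PySem.Dict.get?_mk_cons]
theorem pv_g4 (res : List (String × String)) :
    (pvA_row res).getD "Classes" "" = pvc "classes_comparison_status" res := by
  simp [pvA_row, pvc, PySem.Dict.getD_eq_get?_getD, PySem.Dict.get?_mk_cons]
theorem pv_g5 (res : List (String × String)) :
    (pvA_row res).getD "Tests" "" = pvc "test_reports_status" res := by
  simp [pvA_row, pvc, PySem.Dict.getD_eq_get?_getD, PySem.Dict.get?_mk_cons]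

theorem pv_ins1 (w1 w2 w3 w4 w5 v : Int) :
    (pvMkD w1 w2 w3 w4 w5).insert "Project" v = pvMkD v w2 w3 w4 w5 := by
  apply PySem.Dict.ext
  simp [pvMkD, PySem.Dict.items_insert, PySem.Dict.contains]
theorem pv_get1 (w1 w2 w3 w4 w5 : Int) :
    (pvMkD w1 w2 w3 w4 w5).getD "Project" 0 = w1 := by
  simp [pvMkD, PySem.Dict.getD_eq_get?_getD, PySem.Dict.get?_mk_cons]
theorem pv_mod1 (w1 w2 w3 w4 w5 : Int) :
    (pvMkD w1 w2 w3 w4 w5).modify "Project" 0 (· + 2) = pvMkD (w1 + 2) w2 w3 w4 w5 := by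
  apply PySem.Dict.ext
  simp [pvMkD, PySem.Dict.modify, PySem.Dict.items_insert, PySem.Dict.contains,
    PySem.Dict.getD_eq_get?_getD, PySem.Dict.get?_mk_cons]

theorem pv_ins2 (w1 w2 w3 w4 w5 v : Int) :
    (pvMkD w1 w2 w3 w4 w5).insert "Overall Status" v = pvMkD w1 v w3 w4 w5 := by
  apply PySem.Dict.ext
  simp [pvMkD, PySem.Dict.items_insert, PySem.Dict.contains]
theorem pv_get2 (w1 w2 w3 w4 w5 : Int) :
    (pvMkD w1 w2 w3 w4 w5).getD "Overall Status" 0 = w2 := by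
  simp [pvMkD, PySem.Dict.getD_eq_get?_getD, PySem.Dict.get?_mk_cons]
theorem pv_mod2 (w1 w2 w3 w4 w5 : Int) :
    (pvMkD w1 w2 w3 w4 w5).modify "Overall Status" 0 (· + 2) = pvMkD w1 (w2 + 2) w3 w4 w5 := by
  apply PySem.Dict.ext
  simp [pvMkD, PySem.Dict.modify, PySem.Dict.items_insert, PySem.Dict.contains,
    PySem.Dict.getD_eq_get?_getD, PySem.Dict.get?_mk_cons]

theorem pv_ins3 (w1 w2 w3 w4 w5 v : Int) :
    (pvMkD w1 w2 w3 w4 w5).insert "Artifacts (Core)" v = pvMkD w1 w2 v w4 w5 := by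
  apply PySem.Dict.ext
  simp [pvMkD, PySem.Dict.items_insert, PySem.Dict.contains]
theorem pv_get3 (w1 w2 w3 w4 w5 : Int) :
    (pvMkD w1 w2 w3 w4 w5).getD "Artifacts (Core)" 0 = w3 := by
  simp [pvMkD, PySem.Dict.getD_eq_get?_getD, PySem.Dict.get?_mk_cons]
theorem pv_mod3 (w1 w2 w3 w4 w5 : Int) :
    (pvMkD w1 w2 w3 w4 w5).modify "Artifacts (Core)" 0 (· + 2) = pvMkD w1 w2 (w3 + 2) w4 w5 := by
  apply PySem.Dict.ext
  simp [pvMkD, PySem.Dict.modify, PySem.Dict.items_insert, PySem.Dict.contains,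
    PySem.Dict.getD_eq_get?_getD, PySem.Dict.get?_mk_cons]

theorem pv_ins4 (w1 w2 w3 w4 w5 v : Int) :
    (pvMkD w1 w2 w3 w4 w5).insert "Classes" v = pvMkD w1 w2 w3 v w5 := by
  apply PySem.Dict.ext
  simp [pvMkD, PySem.Dict.items_insert, PySem.Dict.contains]
theorem pv_get4 (w1 w2 w3 w4 w5 : Int) :
    (pvMkD w1 w2 w3 w4 w5).getD "Classes" 0 = w4 := by
  simp [pvMkD, PySem.Dict.getD_eq_get?_getD, PySem.Dict.get?_mk_cons]
theorem pv_mod4 (w1 w2 w3 w4 w5 : Int) :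
    (pvMkD w1 w2 w3 w4 w5).modify "Classes" 0 (· + 2) = pvMkD w1 w2 w3 (w4 + 2) w5 := by
  apply PySem.Dict.ext
  simp [pvMkD, PySem.Dict.modify, PySem.Dict.items_insert, PySem.Dict.contains,
    PySem.Dict.getD_eq_get?_getD, PySem.Dict.get?_mk_cons]

theorem pv_ins5 (w1 w2 w3 w4 w5 v : Int) :
    (pvMkD w1 w2 w3 w4 w5).insert "Tests" v = pvMkD w1 w2 w3 w4 v := by
  apply PySem.Dict.ext
  simp [pvMkD, PySem.Dict.items_insert, PySem.Dict.contains]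
theorem pv_get5 (w1 w2 w3 w4 w5 : Int) :
    (pvMkD w1 w2 w3 w4 w5).getD "Tests" 0 = w5 := by
  simp [pvMkD, PySem.Dict.getD_eq_get?_getD, PySem.Dict.get?_mk_cons]
theorem pv_mod5 (w1 w2 w3 w4 w5 : Int) :
    (pvMkD w1 w2 w3 w4 w5).modify "Tests" 0 (· + 2) = pvMkD w1 w2 w3 w4 (w5 + 2) := by
  apply PySem.Dict.ext
  simp [pvMkD, PySem.Dict.modify, PySem.Dict.items_insert, PySem.Dict.contains,
    PySem.Dict.getD_eq_get?_getD, PySem.Dict.get?_mk_cons]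

theorem pv_keysD (w1 w2 w3 w4 w5 : Int) :
    (pvMkD w1 w2 w3 w4 w5).keys = pvA_headers := by
  simp [pvMkD, pvA_headers, PySem.Dict.keys_mk]

theorem pv_stepA (row : PySem.Dict String String) (w1 w2 w3 w4 w5 : Int) :
    pvA_headers.foldl (fun d h =>
        d.insert h (max (d.getD h 0) (PySem.Str.len (row.getD h "")))) (pvMkD w1 w2 w3 w4 w5)
    = pvMkD (max w1 (PySem.Str.len (row.getD "Project" "")))
            (max w2 (PySem.Str.len (row.getD "Overall Status" "")))
            (max w3 (PySem.Str.len (row.getD "Artifacts (Core)" "")))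
            (max w4 (PySem.Str.len (row.getD "Classes" "")))
            (max w5 (PySem.Str.len (row.getD "Tests" ""))) := by
  simp only [pvA_headers, List.foldl_cons, List.foldl_nil,
    pv_get1, pv_get2, pv_get3, pv_get4, pv_get5,
    pv_ins1, pv_ins2, pv_ins3, pv_ins4, pv_ins5]

theorem pv_foldA (rows : List (PySem.Dict String String)) (w1 w2 w3 w4 w5 : Int) :
    rows.foldl (fun d row => pvA_headers.foldl (fun d h =>
        d.insert h (max (d.getD h 0) (PySem.Str.len (row.getD h "")))) d) (pvMkD w1 w2 w3 w4 w5)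
    = pvMkD (rows.foldl (fun m row => max m (PySem.Str.len (row.getD "Project" ""))) w1)
            (rows.foldl (fun m row => max m (PySem.Str.len (row.getD "Overall Status" ""))) w2)
            (rows.foldl (fun m row => max m (PySem.Str.len (row.getD "Artifacts (Core)" ""))) w3)
            (rows.foldl (fun m row => max m (PySem.Str.len (row.getD "Classes" ""))) w4)
            (rows.foldl (fun m row => max m (PySem.Str.len (row.getD "Tests" ""))) w5) := by
  induction rows generalizing w1 w2 w3 w4 w5 with
  | nil => simp
  | cons r t ih => simp only [List.foldl_cons, pv_stepA, ih]

theorem pv_padA (w1 w2 w3 w4 w5 : Int) :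
    (pvMkD w1 w2 w3 w4 w5).keys.foldl (fun d h => d.modify h 0 (· + 2)) (pvMkD w1 w2 w3 w4 w5)
    = pvMkD (w1 + 2) (w2 + 2) (w3 + 2) (w4 + 2) (w5 + 2) := by
  simp only [pv_keysD, pvA_headers, List.foldl_cons, List.foldl_nil,
    pv_mod1, pv_mod2, pv_mod3, pv_mod4, pv_mod5]

theorem pv_foldl_append {alpha beta : Type} (l : List alpha) (f : alpha → beta) (acc : List beta) :
    l.foldl (fun a x => a ++ [f x]) acc = acc ++ l.map f := by
  induction l generalizing acc with
  | nil => simp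
  | cons x t ih => simp [ih]

-- B's column block in closed form: the running-max width and the three padded pieces
theorem pv_blockB (h k : String) (L : List (List (String × String))) :
    pvB_block h k L =
      pvB_ljust h ((L.foldl (fun m res => max m (PySem.Str.len (pvc k res))) (PySem.Str.len h)) + 2)
      :: String.mk (List.replicate ((L.foldl (fun m res => max m (PySem.Str.len (pvc k res))) (PySem.Str.len h)) + 2).toNat '-')
      :: L.map (fun res => pvB_ljust (pvc k res)
           ((L.foldl (fun m res => max m (PySem.Str.len (pvc k res))) (PySem.Str.len h)) + 2)) := by
  simp [pvB_block, pvc, PySem.List.max?_id_cons, List.foldl_map, List.map_map, Function.comp_def]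

-- after the first two rows all enumerate indices are ≥ 2, so the separator is always " | "
theorem pv_enum_tail {alpha : Type} (L : List alpha) (f g : alpha → String) (s : Int) (hs : 2 ≤ s) :
    (PySem.List.enumerate ((L.map f).zip (L.map g)) s).map
        (fun p => p.2.1 ++ (if p.1 == 1 then "-+-" else " | ") ++ p.2.2)
      = L.map (fun x => f x ++ " | " ++ g x) := by
  induction L generalizing s with
  | nil => simp [PySem.List.enumerate_nil]
  | cons x t ih =>
    have hne : (s == (1 : Int)) = false := by
      rw [beq_eq_false_iff_ne]; omega
    simp only [List.map_cons, List.zip_cons_cons, PySem.List.enumerate_cons, List.map, hne,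
      if_false, Bool.false_eq_true]
    rw [ih (s + 1) (by omega)]

-- stitching one padded column block onto the accumulated lines
theorem pv_step {alpha : Type} (L : List alpha) (a b c d : String) (f g : alpha → String) :
    (PySem.List.enumerate ((a :: b :: L.map f).zip (c :: d :: L.map g))).map
        (fun p => p.2.1 ++ (if p.1 == 1 then "-+-" else " | ") ++ p.2.2)
      = (a ++ " | " ++ c) :: (b ++ "-+-" ++ d) :: L.map (fun x => f x ++ " | " ++ g x) := by
  simp only [List.zip_cons_cons, PySem.List.enumerate_cons, List.map]
  rw [show ((0:Int)+1+1) = 2 by norm_num]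
  rw [pv_enum_tail L f g 2 (by omega)]
  rw [show ((0:Int) == 1) = false from rfl, show (((0:Int)+1) == 1) = true from by decide]
  simp

theorem pv_ljust_eq : pvA_ljust = pvB_ljust := rfl

theorem pv_strjoin_cons_cons (x y : String) (l : List String) :
    PySem.Str.join "\n" (x :: y :: l) = x ++ "\n" ++ PySem.Str.join "\n" (y :: l) := by
  apply String.toList_injective
  simp [PySem.Str.toList_join, PySem.Chars.join_cons_cons]

-- " | ".join of the five cells of a row = the left-to-right concatenation B accumulates
theorem pv_join5 (sep a b c d e : String) :
    PySem.Str.join sep [a, b, c, d, e]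
      = a ++ sep ++ b ++ sep ++ c ++ sep ++ d ++ sep ++ e := by
  apply String.toList_injective
  simp [PySem.Str.toList_join, PySem.Chars.join_cons_cons, PySem.Chars.join_singleton]

set_option maxHeartbeats 2000000 in
theorem pv_main (all_project_results : List (List (String × String))) :
    generate_summary_table_for_file all_project_results
      = generate_summary_table_for_file_alt all_project_results := by
  cases all_project_results with
  | nil => decide
  | cons r0 t0 =>
    unfold generate_summary_table_for_file generate_summary_table_for_file_alt
    simp only [List.isEmpty_cons, if_neg, Bool.false_eq_true, not_false_eq_true]
    simp only [pv_foldl_append]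
    rw [show PySem.Dict.mk (pvA_headers.map (fun h => (h, PySem.Str.len h)))
          = pvMkD (PySem.Str.len "Project") (PySem.Str.len "Overall Status")
                  (PySem.Str.len "Artifacts (Core)") (PySem.Str.len "Classes")
                  (PySem.Str.len "Tests") from rfl]
    rw [List.nil_append, pv_foldA, pv_padA]
    simp only [pvB_spec, List.getD, List.drop, List.foldl_cons, List.foldl_nil, pv_blockB,
      pv_step, List.getElem?_cons_zero, Option.getD_some]
    simp only [List.foldl_cons, List.foldl_map, List.map_map, Function.comp_def,
      pv_g1, pv_g2, pv_g3, pv_g4, pv_g5,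
      pv_get1, pv_get2, pv_get3, pv_get4, pv_get5,
      pvA_headers, List.map_cons, List.map_nil]
    simp only [pv_ljust_eq]
    rw [pv_strjoin_cons_cons, pv_strjoin_cons_cons]
    simp only [List.nil_append, pv_join5, String.append_assoc]

-- ===== VERDICT (by name: the statement is the Claim_ definition above) =====
theorem generate_summary_table_for_file_spec : Claim_equal_generate_summary_table_for_file := by
  intro all _
  exact pv_main all
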